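-- pv_equiv track=rewrite | github.com/AreebaAziz/nserc_web_scraper | src/run.py | format_data_as_list_of_list
-- ===== SOURCE A (Python) =====
-- DETAILS_URL = "http://www.nserc-crsng.gc.ca/ase-oro/Details-Detailles_eng.asp?id={award_id}"
--
-- def format_data_as_list_of_list(data:dict):
-- 	column_headers = [
-- 		'award_id',
-- 		'Award Details URL',
-- 		'Project Title',
-- 		'Amount',
-- 		'Fiscal Year',
-- 		'Program',
-- 	]
-- 	rows = []
-- 	for award_id, info in data.items():
-- 		row_dict = {}
-- 		row_dict[column_headers.index('Award Details URL')] = DETAILS_URL.format(award_id=award_id)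
-- 		for key, value in info.items():
-- 			if (key not in column_headers):
-- 				column_headers.append(key)
-- 			row_dict[str(column_headers.index(key))] = value
-- 		keys = [int(i) for i in row_dict.keys()]
-- 		row = [None] * (max(keys) + 1)
-- 		for index, value in row_dict.items():
-- 			row[int(index)] = value
-- 		rows.append(row)
--
-- 	return rows, column_headers
-- ===== SOURCE B (Python) =====
-- DETAILS_URL = "http://www.nserc-crsng.gc.ca/ase-oro/Details-Detailles_eng.asp?id={award_id}"
--
-- def format_data_as_list_of_list(data: dict):
-- 	# pass 1: grow the full header list (same first-appearance order as the data)
-- 	column_headers = [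
-- 		'award_id',
-- 		'Award Details URL',
-- 		'Project Title',
-- 		'Amount',
-- 		'Fiscal Year',
-- 		'Program',
-- 	]
-- 	for info in data.values():
-- 		for key in info:
-- 			if key not in column_headers:
-- 				column_headers.append(key)
-- 	# one O(1)-lookup index replaces every list.index scan
-- 	pos = {k: i for i, k in enumerate(column_headers)}
-- 	# pass 2: build each row directly at its final width
-- 	rows = []
-- 	for award_id, info in data.items():
-- 		width = 1 + max([1] + [pos[k] for k in info])
-- 		row = [None] * width
-- 		row[1] = DETAILS_URL.format(award_id=award_id)
-- 		for key, value in info.items():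
-- 			row[pos[key]] = value
-- 		rows.append(row)
-- 	return rows, column_headers
-- ===== Notes on version B (the rewrite author's own statement) =====
-- stated objective: faster
-- what changed: Two-pass rebuild: first grow the complete header list, build a key->index dict once, then construct each row directly at its final width with the URL placed first, replacing A's per-award row_dict with int/str index keys, the repeated list.index scans, the max() over converted keys and the separate fill loop.
import Mathlib
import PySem

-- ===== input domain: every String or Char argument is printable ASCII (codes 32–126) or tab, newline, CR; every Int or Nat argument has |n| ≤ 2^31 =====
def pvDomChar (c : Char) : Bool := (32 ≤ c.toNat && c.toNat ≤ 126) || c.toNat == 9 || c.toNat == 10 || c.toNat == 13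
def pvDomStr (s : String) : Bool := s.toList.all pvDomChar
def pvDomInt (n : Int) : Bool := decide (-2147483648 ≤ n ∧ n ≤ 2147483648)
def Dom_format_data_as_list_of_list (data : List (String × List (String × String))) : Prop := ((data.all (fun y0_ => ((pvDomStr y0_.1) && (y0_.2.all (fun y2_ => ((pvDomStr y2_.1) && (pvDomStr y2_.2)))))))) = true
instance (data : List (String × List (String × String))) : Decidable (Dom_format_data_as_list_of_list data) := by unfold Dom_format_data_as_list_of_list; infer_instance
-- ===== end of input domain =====

-- B replaces A's per-key list.index scans and row_dict/max/fill machinery by a two-pass build: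
-- grow the full header list first, then place each value directly via a precomputed key→index dict.

-- DETAILS_URL.format(award_id=aid): plain concatenation (the placeholder is the suffix)
def pvDetailsURL (aid : String) : String := "http://www.nserc-crsng.gc.ca/ase-oro/Details-Detailles_eng.asp?id=" ++ aid

-- the literal initial column_headers list (identical literal in Source A and Source B)
def pvBaseHeaders : List String :=
  ["award_id", "Award Details URL", "Project Title", "Amount", "Fiscal Year", "Program"]

-- list.index(k): never raises in either program (k is always present when looked up)
def pvIdx (h : List String) (k : String) : Int := (((PySem.List.index? h k).getD 0 : Nat) : Int)

-- row[i] = v: the index is always in range in both programs (comment, not a claim)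
def pvSetAt (row : List (Option String)) (i : Int) (v : Option String) : List (Option String) :=
  if 0 ≤ i ∧ i.toNat < row.length then row.set i.toNat v else row

-- ===== PORT A =====
-- A's row_dict has the int key 1 (row_dict[column_headers.index('Award Details URL')]) and
-- str keys str(column_headers.index(key)).  Keys are modeled as (isStr, index) pairs: this is
-- exact because str is injective and int(str(n)) == n, so the later int(i) is the stored index.
def format_data_as_list_of_list (data : List (String × List (String × String))) :
    List (List (Option String)) × List String :=
  data.foldl (fun acc aw =>
    let rd0 : PySem.Dict (Bool × Int) String :=
      PySem.Dict.insert PySem.Dict.empty (false, pvIdx acc.2 "Award Details URL") (pvDetailsURL aw.1)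
    let st2 := aw.2.foldl (fun st2 kv =>
      let ch := if kv.1 ∈ st2.1 then st2.1 else st2.1 ++ [kv.1]
      (ch, PySem.Dict.insert st2.2 (true, pvIdx ch kv.1) kv.2)) (acc.2, rd0)
    let keys := (PySem.Dict.keys st2.2).map (fun k => k.2)      -- [int(i) for i in row_dict.keys()]
    let row0 := List.replicate (((PySem.List.max? keys (fun x => x)).getD 0 + 1).toNat)
      (none : Option String)                                    -- max(keys): keys is never empty
    let row := (PySem.Dict.items st2.2).foldl (fun r p => pvSetAt r p.1.2 (some p.2)) row0
    (acc.1 ++ [row], st2.1))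
    (([] : List (List (Option String))), pvBaseHeaders)

-- ===== PORT B =====
-- pos = {k: i for i, k in enumerate(column_headers)}
def pvPosDict (h : List String) : PySem.Dict String Int :=
  (PySem.List.enumerate h 0).foldl (fun d p => PySem.Dict.insert d p.2 p.1) PySem.Dict.empty

def format_data_as_list_of_list_alt (data : List (String × List (String × String))) :
    List (List (Option String)) × List String :=
  let column_headers := data.foldl (fun ch aw =>
    aw.2.foldl (fun ch kv => if kv.1 ∈ ch then ch else ch ++ [kv.1]) ch) pvBaseHeaders
  let pos := pvPosDict column_headers
  let rows := data.map (fun aw =>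
    let width := ((PySem.List.max? (1 :: aw.2.map (fun kv => PySem.Dict.getD pos kv.1 0))
      (fun x => x)).getD 0 + 1).toNat                           -- pos[k]: always present
    let row0 := pvSetAt (List.replicate width (none : Option String)) 1 (some (pvDetailsURL aw.1))
    aw.2.foldl (fun r kv => pvSetAt r (PySem.Dict.getD pos kv.1 0) (some kv.2)) row0)
  (rows, column_headers)

-- ===== PRECONDITION & SPEC =====
-- Pre_ excludes association lists in which some award's info list has duplicate keys: such inputs
-- do not arise from any Python dict, so A's overwrite-in-place dict-insertion behaviour there is
-- an artefact of the assoc-list encoding, not of the Python programs.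
def Pre_format_data_as_list_of_list (data : List (String × List (String × String))) : Prop :=
  ∀ p ∈ data, (p.2.map Prod.fst).Nodup
instance (data : List (String × List (String × String))) : Decidable (Pre_format_data_as_list_of_list data) := by
  unfold Pre_format_data_as_list_of_list; infer_instance

def pvWitness_format_data_as_list_of_list : (List (String × List (String × String))) :=
  [("a1", [("Project Title", "T"), ("Competition Year", "2020")])]

def Spec_format_data_as_list_of_list (data : List (String × List (String × String))) (out : List (List (Option String)) × List String) : Prop := out = format_data_as_list_of_list_alt data
instance (data : List (String × List (String × String))) (out : List (List (Option String)) × List String) : Decidable (Spec_format_data_as_list_of_list data out) := by unfold Spec_format_data_as_list_of_list; infer_instance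

-- ===== CLAIM (what is proved, stated in full; the proofs are below) =====
def Claim_equal_format_data_as_list_of_list : Prop := ∀ (data : List (String × List (String × String))), Dom_format_data_as_list_of_list data → Pre_format_data_as_list_of_list data → Spec_format_data_as_list_of_list data (format_data_as_list_of_list data)

-- ===== LEMMAS AND PROOFS =====

-- the header-growth step and its folds (proof-side names for the inline loops of both ports)
def pvGrow1 (ch : List String) (k : String) : List String := if k ∈ ch then ch else ch ++ [k]

def pvGrowInfo (ch : List String) (info : List (String × String)) : List String :=
  info.foldl (fun ch kv => pvGrow1 ch kv.1) ch

def pvGrowAll (ch : List String) (d : List (String × List (String × String))) : List String :=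
  d.foldl (fun ch aw => pvGrowInfo ch aw.2) ch

-- B's per-award row, written against a fixed header list h
def pvBRow (h : List String) (aw : String × List (String × String)) : List (Option String) :=
  let pos := pvPosDict h
  let width := ((PySem.List.max? (1 :: aw.2.map (fun kv => PySem.Dict.getD pos kv.1 0))
    (fun x => x)).getD 0 + 1).toNat
  let row0 := pvSetAt (List.replicate width (none : Option String)) 1 (some (pvDetailsURL aw.1))
  aw.2.foldl (fun r kv => pvSetAt r (PySem.Dict.getD pos kv.1 0) (some kv.2)) row0

lemma pvAlt_eq (data : List (String × List (String × String))) :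
    format_data_as_list_of_list_alt data
      = (data.map (pvBRow (pvGrowAll pvBaseHeaders data)), pvGrowAll pvBaseHeaders data) := rfl

lemma prefix_grow1 (ch : List String) (k : String) : ch <+: pvGrow1 ch k := by
  unfold pvGrow1; split
  · exact List.prefix_refl ch
  · exact ⟨[k], rfl⟩

lemma prefix_growInfo (info : List (String × String)) (ch : List String) :
    ch <+: pvGrowInfo ch info := by
  induction info generalizing ch with
  | nil => exact List.prefix_refl ch
  | cons kv t ih =>
      exact (prefix_grow1 ch kv.1).trans (ih (pvGrow1 ch kv.1))

lemma nodup_grow1 {ch : List String} (h : ch.Nodup) (k : String) : (pvGrow1 ch k).Nodup := by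
  unfold pvGrow1; split
  · exact h
  · next hk =>
      simp only [List.nodup_append, h, true_and]
      exact ⟨List.nodup_singleton k, fun a ha => by simp; rintro rfl; exact hk ha⟩

lemma nodup_growInfo {ch : List String} (h : ch.Nodup) (info : List (String × String)) :
    (pvGrowInfo ch info).Nodup := by
  induction info generalizing ch with
  | nil => exact h
  | cons kv t ih => exact ih (nodup_grow1 h kv.1)

lemma nodup_growAll {ch : List String} (h : ch.Nodup) (d : List (String × List (String × String))) :
    (pvGrowAll ch d).Nodup := by
  induction d generalizing ch with
  | nil => exact h
  | cons aw t ih => exact ih (nodup_growInfo h aw.2)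

lemma mem_grow1_self (ch : List String) (k : String) : k ∈ pvGrow1 ch k := by
  unfold pvGrow1; split
  · assumption
  · simp

lemma mem_growInfo_of_mem {info : List (String × String)} {kv : String × String}
    (hkv : kv ∈ info) (ch : List String) : kv.1 ∈ pvGrowInfo ch info := by
  induction info generalizing ch with
  | nil => cases hkv
  | cons hd t ih =>
      rcases List.mem_cons.1 hkv with rfl | hkv
      · exact (prefix_growInfo t (pvGrow1 ch kv.1)).subset (mem_grow1_self ch kv.1)
      · exact ih hkv (pvGrow1 ch hd.1)

-- list.index is stable under extending the list past a member
lemma pvIdx_prefix {ch ch' : List String} {k : String} (hk : k ∈ ch) (hp : ch <+: ch') :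
    pvIdx ch' k = pvIdx ch k := by
  rcases hp with ⟨t, rfl⟩
  unfold pvIdx
  rw [PySem.List.index?_append_of_mem t hk]

-- distinct members of a list have distinct first indices
lemma pvIdx_inj {h : List String} {a b : String} (ha : a ∈ h) (hb : b ∈ h)
    (he : pvIdx h a = pvIdx h b) : a = b := by
  rcases (PySem.List.index?_isSome_iff (xs := h) (v := a)).2 ha |> Option.isSome_iff_exists.1
    with ⟨na, hna⟩
  rcases (PySem.List.index?_isSome_iff (xs := h) (v := b)).2 hb |> Option.isSome_iff_exists.1
    with ⟨nb, hnb⟩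
  unfold pvIdx at he
  rw [hna, hnb] at he
  simp only [Option.getD_some] at he
  have hna' := PySem.List.getElem_of_index?_eq_some hna
  have hnb' := PySem.List.getElem_of_index?_eq_some hnb
  rcases hna' with ⟨hlt1, hget1, _⟩
  rcases hnb' with ⟨hlt2, hget2, _⟩
  have : na = nb := by exact_mod_cast he
  subst this
  rw [← hget1, ← hget2]

-- B's pos dict looks up exactly list.index on the final headers
lemma pvPosDict_getD {h : List String} (hnd : h.Nodup) {k : String} (hk : k ∈ h) :
    PySem.Dict.getD (pvPosDict h) k 0 = pvIdx h k := by
  have hfresh : ∀ p ∈ PySem.List.enumerate h 0,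
      PySem.Dict.contains (PySem.Dict.empty : PySem.Dict String Int) p.2 = false := by
    intro p _; simp [pysem]
  have hmapnd : ((PySem.List.enumerate h 0).map (fun p => p.2)).Nodup := by
    rw [PySem.List.map_snd_enumerate]; exact hnd
  have hitems := PySem.Dict.items_foldl_insert_fresh (PySem.List.enumerate h 0)
    (fun p => p.2) (fun p => p.1) PySem.Dict.empty hfresh hmapnd
  have hkeysnd : (pvPosDict h).keys.Nodup := by
    unfold pvPosDict
    show ((((PySem.List.enumerate h 0).foldl (fun d p => d.insert p.2 p.1) PySem.Dict.empty)).items.map (·.1)).Nodup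
    rw [hitems]
    simp only [PySem.Dict.empty, List.nil_append, List.map_map]
    simpa [Function.comp_def] using hmapnd
  rcases (PySem.List.index?_isSome_iff (xs := h) (v := k)).2 hk |> Option.isSome_iff_exists.1
    with ⟨n, hn⟩
  rcases PySem.List.getElem_of_index?_eq_some hn with ⟨hlt, hget, -⟩
  have hmem : (k, (n : Int)) ∈ (pvPosDict h).items := by
    unfold pvPosDict
    show (k, (n : Int)) ∈ (((PySem.List.enumerate h 0)).foldl (fun d p => d.insert p.2 p.1) PySem.Dict.empty).items
    rw [hitems]
    have hmem0 : ((n : Int), k) ∈ PySem.List.enumerate h 0 := by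
      rw [PySem.List.mem_enumerate_iff]
      exact ⟨n, hlt, by simp [hget]⟩
    have := List.mem_map_of_mem (f := fun p => (p.2, p.1)) hmem0
    simpa using Or.inr this
  have := PySem.Dict.getD_of_mem_items _ hmem hkeysnd 0
  rw [this]
  unfold pvIdx
  rw [hn]; simp

-- A's inner loop, split: headers component is pvGrowInfo, dict component inserts with the
-- index taken in the FINAL header list H (list.index is stable along the prefix chain)
lemma pvInner_split (H : List String) (info : List (String × String)) :
    ∀ (ch : List String) (rd : PySem.Dict (Bool × Int) String),
    pvGrowInfo ch info <+: H →
    info.foldl (fun st2 kv =>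
        let ch := if kv.1 ∈ st2.1 then st2.1 else st2.1 ++ [kv.1]
        (ch, PySem.Dict.insert st2.2 (true, pvIdx ch kv.1) kv.2)) (ch, rd)
      = (pvGrowInfo ch info,
         info.foldl (fun d kv => PySem.Dict.insert d (true, pvIdx H kv.1) kv.2) rd) := by
  induction info with
  | nil => intro ch rd _; rfl
  | cons kv t ih =>
      intro ch rd hpre
      have hgrow : pvGrowInfo ch (kv :: t) = pvGrowInfo (pvGrow1 ch kv.1) t := rfl
      have hpre' : pvGrow1 ch kv.1 <+: H :=
        (prefix_growInfo t (pvGrow1 ch kv.1)).trans (hgrow ▸ hpre)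
      have hidx : pvIdx (pvGrow1 ch kv.1) kv.1 = pvIdx H kv.1 :=
        (pvIdx_prefix (mem_grow1_self ch kv.1) hpre').symm
      simp only [List.foldl_cons]
      rw [show (if kv.1 ∈ ch then ch else ch ++ [kv.1]) = pvGrow1 ch kv.1 from rfl] at *
      rw [hidx]
      exact ih (pvGrow1 ch kv.1) _ (hgrow ▸ hpre)

lemma prefix_growAll (d : List (String × List (String × String))) (ch : List String) :
    ch <+: pvGrowAll ch d := by
  induction d generalizing ch with
  | nil => exact List.prefix_refl ch
  | cons aw t ih => exact (prefix_growInfo aw.2 ch).trans (ih (pvGrowInfo ch aw.2))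

-- the per-award rows agree
lemma pvRow_eq (H : List String) (hndH : H.Nodup)
    (aw : String × List (String × String))
    (ch : List String) (hbase : pvBaseHeaders <+: ch)
    (hpre : pvGrowInfo ch aw.2 <+: H)
    (hinfo : (aw.2.map Prod.fst).Nodup) :
    (let rd0 : PySem.Dict (Bool × Int) String :=
      PySem.Dict.insert PySem.Dict.empty (false, pvIdx ch "Award Details URL") (pvDetailsURL aw.1)
     let st2 := aw.2.foldl (fun st2 kv =>
      let ch := if kv.1 ∈ st2.1 then st2.1 else st2.1 ++ [kv.1]
      (ch, PySem.Dict.insert st2.2 (true, pvIdx ch kv.1) kv.2)) (ch, rd0)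
     let keys := (PySem.Dict.keys st2.2).map (fun k => k.2)
     let row0 := List.replicate (((PySem.List.max? keys (fun x => x)).getD 0 + 1).toNat)
      (none : Option String)
     (PySem.Dict.items st2.2).foldl (fun r p => pvSetAt r p.1.2 (some p.2)) row0)
    = pvBRow H aw := by
  have hADUmem : "Award Details URL" ∈ pvBaseHeaders := by decide
  have hADUbase : pvIdx pvBaseHeaders "Award Details URL" = 1 := by decide
  have hADU : pvIdx ch "Award Details URL" = 1 := by
    rw [pvIdx_prefix hADUmem hbase, hADUbase]
  have hmemH : ∀ kv ∈ aw.2, kv.1 ∈ H := fun kv hkv => hpre.subset (mem_growInfo_of_mem hkv ch)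
  simp only [pvInner_split H aw.2 ch _ hpre, hADU]
  have hfresh : ∀ kv ∈ aw.2,
      (PySem.Dict.insert (PySem.Dict.empty : PySem.Dict (Bool × Int) String)
        (false, (1 : Int)) (pvDetailsURL aw.1)).contains (true, pvIdx H kv.1) = false := by
    intro kv _
    rw [PySem.Dict.contains_insert]
    simp [PySem.Dict.contains_empty]
  have hknd : (aw.2.map (fun kv => ((true, pvIdx H kv.1) : Bool × Int))).Nodup := by
    have hmm : aw.2.map (fun kv => ((true, pvIdx H kv.1) : Bool × Int))
        = (aw.2.map Prod.fst).map (fun s => (true, pvIdx H s)) := by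
      simp [List.map_map, Function.comp_def]
    rw [hmm]
    refine List.Nodup.map_on ?_ hinfo
    intro x hx y hy hxy
    rcases List.mem_map.1 hx with ⟨kx, hkx, rfl⟩
    rcases List.mem_map.1 hy with ⟨ky, hky, rfl⟩
    have h2 : pvIdx H kx.1 = pvIdx H ky.1 := congrArg Prod.snd hxy
    exact pvIdx_inj (hmemH kx hkx) (hmemH ky hky) h2
  have hitems := PySem.Dict.items_foldl_insert_fresh aw.2
    (fun kv => ((true, pvIdx H kv.1) : Bool × Int)) (fun kv => kv.2)
    (PySem.Dict.insert PySem.Dict.empty (false, (1 : Int)) (pvDetailsURL aw.1)) hfresh hknd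
  have hrd0 : (PySem.Dict.insert (PySem.Dict.empty : PySem.Dict (Bool × Int) String)
      (false, (1 : Int)) (pvDetailsURL aw.1)).items = [((false, (1 : Int)), pvDetailsURL aw.1)] := by
    rw [PySem.Dict.items_insert_of_not_contains _ _ (PySem.Dict.contains_empty _)]
    rfl
  rw [hrd0] at hitems
  simp only [PySem.Dict.keys, hitems]
  have hpos : ∀ kv ∈ aw.2, PySem.Dict.getD (pvPosDict H) kv.1 0 = pvIdx H kv.1 :=
    fun kv hkv => pvPosDict_getD hndH (hmemH kv hkv)
  unfold pvBRow
  simp only [List.map_congr_left hpos,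
    PySem.List.foldl_congr_mem aw.2
      (fun r kv => pvSetAt r (PySem.Dict.getD (pvPosDict H) kv.1 0) (some kv.2))
      (fun r kv => pvSetAt r (pvIdx H kv.1) (some kv.2)) _
      (fun acc kv hkv => by simp only [hpos kv hkv]),
    List.map_map, List.map_cons, List.singleton_append,
    List.foldl_cons, List.foldl_map, Function.comp_def]

-- the outer fold of A produces B's rows and headers
lemma pvMain (H : List String) (hndH : H.Nodup)
    (d : List (String × List (String × String))) :
    ∀ (ch : List String) (rows : List (List (Option String))),
    pvBaseHeaders <+: ch → pvGrowAll ch d <+: H →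
    (∀ aw ∈ d, (aw.2.map Prod.fst).Nodup) →
    d.foldl (fun acc aw =>
      let rd0 : PySem.Dict (Bool × Int) String :=
        PySem.Dict.insert PySem.Dict.empty (false, pvIdx acc.2 "Award Details URL") (pvDetailsURL aw.1)
      let st2 := aw.2.foldl (fun st2 kv =>
        let ch := if kv.1 ∈ st2.1 then st2.1 else st2.1 ++ [kv.1]
        (ch, PySem.Dict.insert st2.2 (true, pvIdx ch kv.1) kv.2)) (acc.2, rd0)
      let keys := (PySem.Dict.keys st2.2).map (fun k => k.2)
      let row0 := List.replicate (((PySem.List.max? keys (fun x => x)).getD 0 + 1).toNat)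
        (none : Option String)
      let row := (PySem.Dict.items st2.2).foldl (fun r p => pvSetAt r p.1.2 (some p.2)) row0
      (acc.1 ++ [row], st2.1)) (rows, ch)
      = (rows ++ d.map (pvBRow H), pvGrowAll ch d) := by
  induction d with
  | nil => intro ch rows _ _ _; simp [pvGrowAll]
  | cons aw t ih =>
      intro ch rows hbase hpre hinfos
      have hpre1 : pvGrowInfo ch aw.2 <+: H :=
        (prefix_growAll t (pvGrowInfo ch aw.2)).trans hpre
      have hstep := pvRow_eq H hndH aw ch hbase hpre1 (hinfos aw (by simp))
      have hsplit := pvInner_split H aw.2 ch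
        (PySem.Dict.insert PySem.Dict.empty (false, pvIdx ch "Award Details URL") (pvDetailsURL aw.1))
        hpre1
      simp only [List.foldl_cons]
      have happ : (fun (acc : List (List (Option String)) × List String) aw =>
          let rd0 : PySem.Dict (Bool × Int) String :=
            PySem.Dict.insert PySem.Dict.empty (false, pvIdx acc.2 "Award Details URL") (pvDetailsURL aw.1)
          let st2 := aw.2.foldl (fun st2 kv =>
            let ch := if kv.1 ∈ st2.1 then st2.1 else st2.1 ++ [kv.1]
            (ch, PySem.Dict.insert st2.2 (true, pvIdx ch kv.1) kv.2)) (acc.2, rd0)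
          let keys := (PySem.Dict.keys st2.2).map (fun k => k.2)
          let row0 := List.replicate (((PySem.List.max? keys (fun x => x)).getD 0 + 1).toNat)
            (none : Option String)
          let row := (PySem.Dict.items st2.2).foldl (fun r p => pvSetAt r p.1.2 (some p.2)) row0
          (acc.1 ++ [row], st2.1)) (rows, ch) aw
          = (rows ++ [pvBRow H aw], pvGrowInfo ch aw.2) := by
        refine Prod.ext ?_ ?_
        · exact congrArg (fun z => rows ++ [z]) hstep
        · exact congrArg Prod.fst hsplit
      simp only [] at happ
      rw [happ, ih (pvGrowInfo ch aw.2) (rows ++ [pvBRow H aw])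
        (hbase.trans (prefix_growInfo aw.2 ch)) hpre
        (fun a ha => hinfos a (List.mem_cons_of_mem aw ha))]
      simp [pvGrowAll]

-- ===== VERDICT (by name: the statement is the Claim_ definition above) =====
theorem format_data_as_list_of_list_spec : Claim_equal_format_data_as_list_of_list := by
  intro data _ hpre
  unfold Spec_format_data_as_list_of_list
  rw [pvAlt_eq]
  unfold format_data_as_list_of_list
  have hndH : (pvGrowAll pvBaseHeaders data).Nodup :=
    nodup_growAll (by decide) data
  rw [pvMain (pvGrowAll pvBaseHeaders data) hndH data pvBaseHeaders []
    (List.prefix_refl _) (List.prefix_refl _) hpre]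
  simp
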